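-- pv_equiv track=rewrite | github.com/ArielJiang0520/UCI_Site_Search_Engine | Indexing.py | has_repetitive_pattern
-- ===== SOURCE A (Python) =====
-- from collections import defaultdict
--
-- def has_repetitive_pattern(path):
--  """
--  Function that checks whether the path of the url has repeating paths
--  """
--  parts = path.split("/")
--
--  d = defaultdict(int)
--  lastword = ""
--  for each in parts:
--      d[each] += 1
--      if d[each] > 3:
--          return True
--  return False
-- ===== SOURCE B (Python) =====
-- def has_repetitive_pattern(path):
--     """
--     Function that checks whether the path of the url has repeating paths
--     """
--     parts = sorted(path.split("/"))
--     run = 0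
--     prev = None
--     for seg in parts:
--         run = run + 1 if seg == prev else 1
--         if run >= 4:
--             return True
--         prev = seg
--     return False
-- ===== Notes on version B (the rewrite author's own statement) =====
-- stated objective: alternative
-- what changed: Replaces the live frequency dictionary with sort-then-scan: sort the segments so equal ones are adjacent and detect a run of length 4 with a single run-length counter.
import Mathlib
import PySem

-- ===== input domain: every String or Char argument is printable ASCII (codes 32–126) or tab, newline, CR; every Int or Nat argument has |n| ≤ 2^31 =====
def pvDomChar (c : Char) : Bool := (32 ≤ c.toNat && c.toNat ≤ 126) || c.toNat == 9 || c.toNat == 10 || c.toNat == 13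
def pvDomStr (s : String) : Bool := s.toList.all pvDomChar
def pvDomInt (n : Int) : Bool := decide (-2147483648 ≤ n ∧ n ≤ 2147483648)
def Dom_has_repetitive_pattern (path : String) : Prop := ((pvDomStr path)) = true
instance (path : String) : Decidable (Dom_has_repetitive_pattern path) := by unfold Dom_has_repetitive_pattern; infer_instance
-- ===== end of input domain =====

-- B replaces A's live frequency dictionary by sort-then-run-length-scan (alternative decomposition, same result).

-- shared by both ports: path.split("/") (sep is the nonempty literal "/", so split cannot raise)
def pvSplitSlash (path : String) : List String :=
  (PySem.Chars.splitOn path.toList ['/']).map String.ofList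

-- ===== PORT A =====
-- the loop 'for each in parts: d[each] += 1; if d[each] > 3: return True' with its defaultdict(int) state
def pvALoop : List String → PySem.Dict String Int → Bool
  | [], _ => false
  | x :: xs, d =>
    let d' := d.insert x (d.getD x 0 + 1)
    if d'.getD x 0 > 3 then true else pvALoop xs d'

def has_repetitive_pattern (path : String) : Bool :=
  pvALoop (pvSplitSlash path) PySem.Dict.empty

-- ===== PORT B =====
-- the loop 'for seg in parts: run = run + 1 if seg == prev else 1; if run >= 4: return True; prev = seg'
def pvBLoop : List String → Option String → Int → Bool
  | [], _, _ => false
  | x :: xs, prev, run =>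
    let run' := if some x = prev then run + 1 else 1
    if 4 ≤ run' then true else pvBLoop xs (some x) run'

def has_repetitive_pattern_alt (path : String) : Bool :=
  pvBLoop (PySem.List.sorted (pvSplitSlash path) (fun x => x) false) none 0

-- ===== PRECONDITION & SPEC =====
def Spec_has_repetitive_pattern (path : String) (out : Bool) : Prop := out = has_repetitive_pattern_alt path
instance (path : String) (out : Bool) : Decidable (Spec_has_repetitive_pattern path out) := by unfold Spec_has_repetitive_pattern; infer_instance

-- ===== CLAIM (what is proved, stated in full; the proofs are below) =====
def Claim_equal_has_repetitive_pattern : Prop := ∀ (path : String), Dom_has_repetitive_pattern path → Spec_has_repetitive_pattern path (has_repetitive_pattern path)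

-- ===== LEMMAS AND PROOFS =====

-- A's loop (counts-so-far abstracted as f) returns true iff some remaining element's total count reaches 4
lemma pvALoop_iff (l : List String) (d : PySem.Dict String Int) (f : String → Nat)
    (hd : ∀ v, d.getD v 0 = (f v : Int)) :
    pvALoop l d = true ↔ ∃ x ∈ l, 4 ≤ f x + l.count x := by
  induction l generalizing d f with
  | nil => simp [pvALoop]
  | cons x xs ih =>
    simp only [pvALoop]
    have hgx : (d.insert x (d.getD x 0 + 1)).getD x 0 = ((f x : Int) + 1) := by
      simp [hd]
    rw [hgx]
    by_cases hbig : ((f x : Int) + 1) > 3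
    · have hx : ∃ y ∈ x :: xs, 4 ≤ f y + (x :: xs).count y := by
        refine ⟨x, List.mem_cons_self, ?_⟩
        simp only [List.count_cons_self]
        omega
      simp only [if_pos hbig]
      exact iff_of_true (by trivial) hx
    · rw [if_neg hbig]
      have hd' : ∀ v, (d.insert x (d.getD x 0 + 1)).getD v 0
          = (((fun v => if v = x then f x + 1 else f v) v : Nat) : Int) := by
        intro v
        rw [PySem.Dict.getD_insert]
        by_cases hv : v = x
        · subst hv; simp [hd]
        · simp [hv, hd]
      rw [ih _ _ hd']
      constructor
      · rintro ⟨y, hy, hc⟩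
        refine ⟨y, List.mem_cons_of_mem _ hy, ?_⟩
        by_cases hyx : y = x
        · subst hyx
          simp at hc
          simp only [List.count_cons_self]
          omega
        · simp only [if_neg hyx] at hc
          rw [List.count_cons_of_ne (Ne.symm hyx)]
          exact hc
      · rintro ⟨y, hy, hc⟩
        by_cases hyx : y = x
        · subst hyx
          simp only [List.count_cons_self] at hc
          have hmem : y ∈ xs := by
            by_contra hnm
            have h0 : xs.count y = 0 := List.count_eq_zero.mpr hnm
            omega
          refine ⟨y, hmem, ?_⟩
          simp
          omega
        · rcases List.mem_cons.mp hy with h | h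
          · exact absurd h hyx
          · refine ⟨y, h, ?_⟩
            simp only [if_neg hyx]
            rw [List.count_cons_of_ne (Ne.symm hyx)] at hc
            exact hc

-- B's run-length loop on a sorted remainder l (every element ≥ the previous one p, current run r ≤ 3)
lemma pvBLoop_iff (l : List String) (p : String) (r : Int)
    (hs : l.Pairwise (· ≤ ·)) (hle : ∀ y ∈ l, p ≤ y) (hr0 : 0 ≤ r) (hr3 : r ≤ 3) :
    pvBLoop l (some p) r = true ↔ (4 ≤ r + (l.count p : Int)) ∨ ∃ y ∈ l, 4 ≤ l.count y := by
  induction l generalizing p r with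
  | nil => simp [pvBLoop]; omega
  | cons x xs ih =>
    have hsx : xs.Pairwise (· ≤ ·) := hs.tail
    have hxle : ∀ y ∈ xs, x ≤ y := fun y hy => (List.pairwise_cons.mp hs).1 y hy
    simp only [pvBLoop]
    by_cases hxp : x = p
    · subst hxp
      rw [if_pos rfl]
      by_cases hbig : (4:Int) ≤ r + 1
      · rw [if_pos hbig]
        refine iff_of_true (by trivial) (Or.inl ?_)
        simp only [List.count_cons_self]; omega
      · rw [if_neg hbig, ih x (r + 1) hsx hxle (by omega) (by omega)]
        simp only [List.count_cons_self]
        constructor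
        · rintro (h | ⟨y, hy, hc⟩)
          · left; push_cast at h ⊢; omega
          · by_cases hyx : y = x
            · subst hyx; left; omega
            · right; exact ⟨y, List.mem_cons_of_mem _ hy,
                by rwa [List.count_cons_of_ne (Ne.symm hyx)]⟩
        · rintro (h | ⟨y, hy, hc⟩)
          · left; push_cast at h ⊢; omega
          · by_cases hyx : y = x
            · subst hyx
              simp only [List.count_cons_self] at hc
              left; omega
            · rcases List.mem_cons.mp hy with h' | h'
              · exact absurd h' hyx
              · right
                rw [List.count_cons_of_ne (Ne.symm hyx)] at hc
                exact ⟨y, h', hc⟩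
    · have hpx : p ≤ x := hle x List.mem_cons_self
      have hpnot : p ∉ x :: xs := by
        intro hmem
        rcases List.mem_cons.mp hmem with h | h
        · exact hxp h.symm
        · exact hxp (le_antisymm (hxle p h) hpx)
      have hpcount : (x :: xs).count p = 0 := List.count_eq_zero.mpr hpnot
      rw [if_neg (by simp [hxp] : ¬ some x = some p),
        if_neg (by omega : ¬ (4:Int) ≤ 1),
        ih x 1 hsx hxle (by omega) (by omega)]
      rw [hpcount]
      constructor
      · rintro (h | ⟨y, hy, hc⟩)
        · right; refine ⟨x, List.mem_cons_self, ?_⟩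
          simp only [List.count_cons_self]; omega
        · by_cases hyx : y = x
          · subst hyx; right
            refine ⟨y, List.mem_cons_self, ?_⟩
            simp only [List.count_cons_self]; omega
          · right
            rw [← List.count_cons_of_ne (Ne.symm hyx)] at hc
            exact ⟨y, List.mem_cons_of_mem _ hy, hc⟩
      · rintro (h | ⟨y, hy, hc⟩)
        · push_cast at h; omega
        · by_cases hyx : y = x
          · subst hyx
            simp only [List.count_cons_self] at hc
            left; omega
          · rcases List.mem_cons.mp hy with h' | h'
            · exact absurd h' hyx
            · right
              rw [List.count_cons_of_ne (Ne.symm hyx)] at hc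
              exact ⟨y, h', hc⟩

-- both loops decide the same property: some segment occurs at least 4 times
lemma pvA_counts (parts : List String) :
    (pvALoop parts PySem.Dict.empty = true) ↔ ∃ x ∈ parts, 4 ≤ parts.count x := by
  have h := pvALoop_iff parts PySem.Dict.empty (fun _ => 0)
    (by intro v; simp [PySem.Dict.getD_empty])
  simpa using h

lemma pvB_counts (parts : List String) :
    (pvBLoop (PySem.List.sorted parts (fun x => x) false) none 0 = true)
      ↔ ∃ x ∈ parts, 4 ≤ parts.count x := by
  set s := PySem.List.sorted parts (fun x => x) false with hsdef
  have hperm : s.Perm parts := PySem.List.sorted_perm parts (fun x => x) false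
  have hpair : s.Pairwise (· ≤ ·) := by
    have := PySem.List.sorted_pairwise parts (fun x => x)
    simpa [hsdef] using this
  have hgoal : (pvBLoop s none 0 = true) ↔ ∃ x ∈ s, 4 ≤ s.count x := by
    cases hscase : s with
    | nil => simp [pvBLoop]
    | cons x xs =>
      rw [hscase] at hpair
      have hsx : xs.Pairwise (· ≤ ·) := hpair.tail
      have hxle : ∀ y ∈ xs, x ≤ y := fun y hy => (List.pairwise_cons.mp hpair).1 y hy
      simp only [pvBLoop]
      rw [if_neg (by simp : ¬ some x = none),
        if_neg (by omega : ¬ (4:Int) ≤ 1),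
        pvBLoop_iff xs x 1 hsx hxle (by omega) (by omega)]
      constructor
      · rintro (h | ⟨y, hy, hc⟩)
        · refine ⟨x, List.mem_cons_self, ?_⟩
          simp only [List.count_cons_self]; omega
        · by_cases hyx : y = x
          · subst hyx
            refine ⟨y, List.mem_cons_self, ?_⟩
            simp only [List.count_cons_self]; omega
          · rw [← List.count_cons_of_ne (Ne.symm hyx)] at hc
            exact ⟨y, List.mem_cons_of_mem _ hy, hc⟩
      · rintro ⟨y, hy, hc⟩
        by_cases hyx : y = x
        · subst hyx
          simp only [List.count_cons_self] at hc
          left; omega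
        · rcases List.mem_cons.mp hy with h' | h'
          · exact absurd h' hyx
          · right
            rw [List.count_cons_of_ne (Ne.symm hyx)] at hc
            exact ⟨y, h', hc⟩
  rw [hgoal]
  constructor
  · rintro ⟨y, hy, hc⟩
    exact ⟨y, hperm.mem_iff.mp hy, by rwa [hperm.count_eq] at hc⟩
  · rintro ⟨y, hy, hc⟩
    exact ⟨y, hperm.mem_iff.mpr hy, by rwa [hperm.count_eq]⟩

-- ===== VERDICT (by name: the statement is the Claim_ definition above) =====
theorem has_repetitive_pattern_spec : Claim_equal_has_repetitive_pattern := by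
  intro path _
  unfold Spec_has_repetitive_pattern has_repetitive_pattern has_repetitive_pattern_alt
  rw [Bool.eq_iff_iff, pvA_counts, pvB_counts]
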